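-- pv_equiv track=rewrite | github.com/deleon2/Lab2SeguridadInformatica | lab2_2.py | descifrado
-- ===== SOURCE A (Python) =====
-- def descifrado(palabra, desplazamiento):
--
--     if len(palabra) <= 1:
--         return palabra
--
--     mover = desplazamiento % len(palabra)
--     mensaje = palabra[mover:] + palabra[:mover]
--
--     alfabeto= 'abcdefghijklmnopqrstuvwxyz'
--     cifrado= ''
--     for i in range(len(mensaje)):
--         for j in range(len(alfabeto)):
--             if (mensaje[i] == alfabeto[j]):
--                 cifrado= cifrado + alfabeto[(j-desplazamiento)%26]
--
--     return(cifrado)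
-- ===== SOURCE B (Python) =====
-- def descifrado(palabra, desplazamiento):
--     if len(palabra) <= 1:
--         return palabra
--     mover = desplazamiento % len(palabra)
--     # decode in one pass over the ORIGINAL string (no rotated copy of the input);
--     # since decoding is per-character, the rotation can instead be applied to the
--     # OUTPUT, shifted by the number of kept (lowercase) characters in palabra[:mover]
--     salida = [chr((ord(c) - 97 - desplazamiento) % 26 + 97)
--               for c in palabra if 'a' <= c <= 'z']
--     k = sum(1 for c in palabra[:mover] if 'a' <= c <= 'z')
--     return ''.join(salida[k:] + salida[:k])
-- ===== Notes on version B (the rewrite author's own statement) =====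
-- stated objective: alternative
-- what changed: B never builds a rotated copy of the input: it decodes the original string in one ordinal-arithmetic pass (list comprehension) and applies the rotation to the decoded OUTPUT, cutting it at the count of kept lowercase characters in palabra[:mover]; A's per-character 26-letter table scan and repeated string concatenation disappear
import Mathlib
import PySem

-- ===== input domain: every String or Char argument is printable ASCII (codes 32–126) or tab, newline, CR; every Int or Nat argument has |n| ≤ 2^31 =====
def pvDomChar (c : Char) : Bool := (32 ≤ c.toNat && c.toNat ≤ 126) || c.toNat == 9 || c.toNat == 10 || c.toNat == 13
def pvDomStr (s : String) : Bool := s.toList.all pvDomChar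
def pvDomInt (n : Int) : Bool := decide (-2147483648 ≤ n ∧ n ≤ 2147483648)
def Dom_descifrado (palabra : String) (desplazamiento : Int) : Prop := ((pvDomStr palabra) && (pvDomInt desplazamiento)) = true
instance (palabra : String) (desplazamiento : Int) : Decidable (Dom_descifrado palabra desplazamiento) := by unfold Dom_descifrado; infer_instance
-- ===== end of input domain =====

-- B decodes the original string in one pass and rotates the OUTPUT by the count of kept
-- lowercase characters in the pre-rotation prefix, instead of rotating the input and
-- scanning a 26-letter table per character; equivalence is proved on all inputs.

-- ===== PORT A =====
-- the local constant `alfabeto` of A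
def descifrado_alfabeto : List Char := "abcdefghijklmnopqrstuvwxyz".toList

def descifrado (palabra : String) (desplazamiento : Int) : String :=
  let cs := palabra.toList
  if cs.length ≤ 1 then palabra
  else
    let mover := PySem.Int.mod desplazamiento (cs.length : Int)
    let mensaje := PySem.List.slice cs (some mover) none ++ PySem.List.slice cs none (some mover)
    let cifrado :=
      (PySem.List.pyRange 0 (mensaje.length : Int) 1).foldl
        (fun acc i =>
          (PySem.List.pyRange 0 26 1).foldl
            (fun acc2 j =>
              if PySem.List.pyGetD mensaje i ' ' = PySem.List.pyGetD descifrado_alfabeto j ' '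
              then acc2 ++ [PySem.List.pyGetD descifrado_alfabeto
                      (PySem.Int.mod (j - desplazamiento) 26) ' ']
              else acc2)
            acc)
        ([] : List Char)
    String.ofList cifrado

-- ===== PORT B =====
def descifrado_alt (palabra : String) (desplazamiento : Int) : String :=
  let cs := palabra.toList
  if cs.length ≤ 1 then palabra
  else
    let mover := PySem.Int.mod desplazamiento (cs.length : Int)
    let salida := cs.filterMap (fun c =>
      if 'a' ≤ c ∧ c ≤ 'z'
      then some (Char.ofNat
             ((PySem.Int.mod ((c.toNat : Int) - 97 - desplazamiento) 26).toNat + 97))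
      else none)
    let k := (PySem.List.slice cs none (some mover)).countP
               (fun c => decide ('a' ≤ c ∧ c ≤ 'z'))
    String.ofList (PySem.List.slice salida (some (k : Int)) none
                   ++ PySem.List.slice salida none (some (k : Int)))

-- ===== PRECONDITION & SPEC =====
def Spec_descifrado (palabra : String) (desplazamiento : Int) (out : String) : Prop := out = descifrado_alt palabra desplazamiento
instance (palabra : String) (desplazamiento : Int) (out : String) : Decidable (Spec_descifrado palabra desplazamiento out) := by unfold Spec_descifrado; infer_instance

-- ===== CLAIM =====
def Claim_equal_descifrado : Prop := ∀ (palabra : String) (desplazamiento : Int), Dom_descifrado palabra desplazamiento → Spec_descifrado palabra desplazamiento (descifrado palabra desplazamiento)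

-- ===== LEMMAS AND PROOFS =====

-- abbreviations used only in the proofs
def pvG (d : Int) (c : Char) : Char :=
  Char.ofNat ((PySem.Int.mod ((c.toNat : Int) - 97 - d) 26).toNat + 97)
def pvP (c : Char) : Bool := decide ('a' ≤ c ∧ c ≤ 'z')

theorem pv_toNat_ofNat (n : Nat) (h : n < 1000) : (Char.ofNat n).toNat = n := by
  rw [Char.toNat_ofNat, if_pos (Or.inl (by omega))]

theorem pv_char_eq_iff (a b : Char) : a = b ↔ a.toNat = b.toNat := by
  constructor
  · rintro rfl; rfl
  · intro h
    exact Char.ext (by exact UInt32.toNat_inj.mp h)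

theorem pv_alfa_get (i : Int) (h0 : 0 ≤ i) (h1 : i < 26) :
    PySem.List.pyGetD descifrado_alfabeto i ' ' = Char.ofNat (i.toNat + 97) := by
  rw [PySem.List.pyGetD_eq_getElem descifrado_alfabeto ' ' h0 (by simpa [descifrado_alfabeto] using h1)]
  have : ∀ m : Fin 26, descifrado_alfabeto[m.val]'(by simp [descifrado_alfabeto])
      = Char.ofNat (m.val + 97) := by decide
  have hlt : i.toNat < 26 := by omega
  exact this ⟨i.toNat, hlt⟩

theorem pv_foldl_append_ite {α β : Type} (P : α → Prop) [DecidablePred P] (f : α → β)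
    (l : List α) (acc : List β) :
    l.foldl (fun a x => if P x then a ++ [f x] else a) acc
      = acc ++ (l.filter (fun x => decide (P x))).map f := by
  induction l generalizing acc with
  | nil => simp
  | cons x t ih =>
    by_cases h : P x <;> simp [List.foldl_cons, h, ih, List.append_assoc]

theorem pv_filter_lower (k : Nat) :
    (PySem.List.pyRange 0 26 1).filter (fun j => decide ((k : Int) = j + 97))
      = if 97 ≤ k ∧ k ≤ 122 then [(k : Int) - 97] else [] := by
  by_cases h : 97 ≤ k ∧ k ≤ 122
  · rw [if_pos h]
    obtain ⟨h1, h2⟩ := h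
    interval_cases k <;> decide
  · rw [if_neg h]
    rw [List.filter_eq_nil_iff]
    intro a ha
    rw [PySem.List.mem_pyRange_one] at ha
    simp only [decide_eq_true_eq]
    omega

theorem pv_lower_iff (c : Char) : ('a' ≤ c ∧ c ≤ 'z') ↔ (97 ≤ c.toNat ∧ c.toNat ≤ 122) := by
  rw [Char.le_def, Char.le_def, UInt32.le_iff_toNat_le, UInt32.le_iff_toNat_le]
  rfl

theorem pv_inner_eq (c : Char) (d : Int) (acc : List Char) :
    (PySem.List.pyRange 0 26 1).foldl
      (fun acc2 j =>
        if c = PySem.List.pyGetD descifrado_alfabeto j ' '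
        then acc2 ++ [PySem.List.pyGetD descifrado_alfabeto (PySem.Int.mod (j - d) 26) ' ']
        else acc2)
      acc
    = acc ++ (if 'a' ≤ c ∧ c ≤ 'z' then [pvG d c] else []) := by
  rw [pv_foldl_append_ite (fun j => c = PySem.List.pyGetD descifrado_alfabeto j ' ')]
  have hfc : (PySem.List.pyRange 0 26 1).filter
        (fun j => decide (c = PySem.List.pyGetD descifrado_alfabeto j ' '))
      = (PySem.List.pyRange 0 26 1).filter (fun j => decide ((c.toNat : Int) = j + 97)) := by
    apply List.filter_congr
    intro j hj
    rw [PySem.List.mem_pyRange_one] at hj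
    rw [pv_alfa_get j hj.1 hj.2]
    simp only [decide_eq_decide]
    rw [pv_char_eq_iff]
    rw [pv_toNat_ofNat (j.toNat + 97) (by omega)]
    omega
  rw [hfc, pv_filter_lower c.toNat]
  by_cases h : 97 ≤ c.toNat ∧ c.toNat ≤ 122
  · rw [if_pos h, if_pos ((pv_lower_iff c).mpr h)]
    simp only [List.map_cons, List.map_nil]
    congr 2
    have hnn : 0 ≤ PySem.Int.mod ((c.toNat : Int) - 97 - d) 26 := PySem.Int.mod_nonneg _ (by norm_num)
    have hlt : PySem.Int.mod ((c.toNat : Int) - 97 - d) 26 < 26 := PySem.Int.mod_lt _ (by norm_num)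
    unfold pvG
    rw [show (c.toNat : Int) - 97 - d = ((c.toNat : Int) - 97) - d by ring]
    exact pv_alfa_get _ hnn hlt
  · rw [if_neg h, if_neg (fun hh => h ((pv_lower_iff c).mp hh))]
    simp

theorem pv_flatMap_eq (d : Int) (l : List Char) :
    l.flatMap (fun c => if 'a' ≤ c ∧ c ≤ 'z' then [pvG d c] else [])
      = (l.filter pvP).map (pvG d) := by
  induction l with
  | nil => rfl
  | cons x t ih =>
    by_cases h : 'a' ≤ x ∧ x ≤ 'z' <;>
      simp [pvP, h, ih]

theorem pv_filterMap_eq (d : Int) (l : List Char) :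
    l.filterMap (fun c =>
        if 'a' ≤ c ∧ c ≤ 'z'
        then some (Char.ofNat ((PySem.Int.mod ((c.toNat : Int) - 97 - d) 26).toNat + 97))
        else none)
      = (l.filter pvP).map (pvG d) := by
  induction l with
  | nil => rfl
  | cons x t ih =>
    by_cases h : 'a' ≤ x ∧ x ≤ 'z'
    · have hx : (if 'a' ≤ x ∧ x ≤ 'z'
          then some (Char.ofNat ((PySem.Int.mod ((x.toNat : Int) - 97 - d) 26).toNat + 97))
          else none) = some (pvG d x) := if_pos h
      have hp : pvP x = true := by simpa [pvP] using h
      simp only [List.filterMap_cons, hx, List.filter_cons, hp, if_true, List.map_cons, ih]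
    · have hx : (if 'a' ≤ x ∧ x ≤ 'z'
          then some (Char.ofNat ((PySem.Int.mod ((x.toNat : Int) - 97 - d) 26).toNat + 97))
          else none) = (none : Option Char) := if_neg h
      have hp : pvP x = false := by simpa [pvP] using h
      simp only [List.filterMap_cons, hx, List.filter_cons, hp, if_false, ih,
        Bool.false_eq_true]

-- ===== VERDICT =====
theorem descifrado_spec : Claim_equal_descifrado := by
  intro palabra d _
  unfold Spec_descifrado
  simp only [descifrado, descifrado_alt]
  by_cases hlen : palabra.toList.length ≤ 1
  · rw [if_pos hlen, if_pos hlen]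
  · rw [if_neg hlen, if_neg hlen]
    set cs := palabra.toList with hcs
    have hm0 : 0 ≤ PySem.Int.mod d (cs.length : Int) :=
      PySem.Int.mod_nonneg _ (by exact_mod_cast (by omega : 0 < cs.length))
    set mover := PySem.Int.mod d (cs.length : Int) with hmover
    have hsf : PySem.List.slice cs (some mover) none = cs.drop mover.toNat :=
      PySem.List.slice_from cs hm0
    have hst : PySem.List.slice cs none (some mover) = cs.take mover.toNat :=
      PySem.List.slice_to cs hm0
    set m := mover.toNat with hmn
    congr 1
    -- A's side reduces to (filter → map) over the rotated list
    rw [PySem.List.foldl_pyRange_zero_pyGetD'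
      (PySem.List.slice cs (some mover) none ++ PySem.List.slice cs none (some mover)) ' '
      (fun acc c =>
        (PySem.List.pyRange 0 26 1).foldl
          (fun acc2 j =>
            if c = PySem.List.pyGetD descifrado_alfabeto j ' '
            then acc2 ++ [PySem.List.pyGetD descifrado_alfabeto (PySem.Int.mod (j - d) 26) ' ']
            else acc2)
          acc) []]
    have hstep :
        (PySem.List.slice cs (some mover) none ++ PySem.List.slice cs none (some mover)).foldl
          (fun acc c =>
            (PySem.List.pyRange 0 26 1).foldl
              (fun acc2 j =>
                if c = PySem.List.pyGetD descifrado_alfabeto j ' '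
                then acc2 ++ [PySem.List.pyGetD descifrado_alfabeto (PySem.Int.mod (j - d) 26) ' ']
                else acc2)
              acc) []
        = (PySem.List.slice cs (some mover) none ++ PySem.List.slice cs none (some mover)).foldl
            (fun acc c => acc ++ (if 'a' ≤ c ∧ c ≤ 'z' then [pvG d c] else [])) [] := by
      apply PySem.List.foldl_congr_mem
      intro acc c _
      exact pv_inner_eq c d acc
    rw [hstep, PySem.List.foldl_append_eq_flatMap, List.nil_append,
        pv_flatMap_eq d, hsf, hst]
    -- B's side: rotate the filtered-mapped output at the kept-prefix count
    rw [pv_filterMap_eq d cs]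
    rw [show (fun c => decide ('a' ≤ c ∧ c ≤ 'z')) = pvP from rfl]
    set k := (cs.take m).countP pvP with hk
    rw [PySem.List.slice_from_natCast, PySem.List.slice_to_natCast]
    have hsplit : (cs.filter pvP).map (pvG d)
        = ((cs.take m).filter pvP).map (pvG d) ++ ((cs.drop m).filter pvP).map (pvG d) := by
      rw [← List.map_append, ← List.filter_append, List.take_append_drop]
    have hklen : (((cs.take m).filter pvP).map (pvG d)).length = k := by
      rw [List.length_map, ← List.countP_eq_length_filter]
    rw [hsplit, List.filter_append, List.map_append]
    rw [← hklen, List.drop_left, List.take_left]
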